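-- pv_equiv track=rewrite | github.com/AhmadTaj1754/vowelRecognition | vowelRecognitionOne.py | vowel_recognition
-- ===== SOURCE A (Python) =====
-- def vowel_recognition(s):
--     vowels ="aeiouAEIOU"
--     count = 0
--
--     times= len(s)
--     x=0
--
--     for i in range(len(s)):
--             if s[i] in vowels:
--                 count+=1
--
--     for j in range(times-1):
--         for i in range(len(s)-1):
--             check= s[0:(i+2)]
--             for i in range(len(check)):
--                 if check[i] in vowels:
--                     count+=1
--         s= s[(x+1):]
--
--
--     return count
-- ===== SOURCE B (Python) =====
-- def vowel_recognition(s):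
--     # Closed-form weights: the character at index i is counted (i+1)*(n-i) times
--     # across A's base scan and all prefix-of-suffix rescans.
--     n = len(s)
--     vowels = set("aeiouAEIOU")
--     return sum((i + 1) * (n - i) for i, c in enumerate(s) if c in vowels)
-- ===== Notes on version B (the rewrite author's own statement) =====
-- stated objective: faster
-- what changed: Replaces A's nested rescanning of every prefix of every suffix (cubic) by a single pass that adds the closed-form multiplicity (i+1)*(n-i) for each vowel at index i.
import Mathlib
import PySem

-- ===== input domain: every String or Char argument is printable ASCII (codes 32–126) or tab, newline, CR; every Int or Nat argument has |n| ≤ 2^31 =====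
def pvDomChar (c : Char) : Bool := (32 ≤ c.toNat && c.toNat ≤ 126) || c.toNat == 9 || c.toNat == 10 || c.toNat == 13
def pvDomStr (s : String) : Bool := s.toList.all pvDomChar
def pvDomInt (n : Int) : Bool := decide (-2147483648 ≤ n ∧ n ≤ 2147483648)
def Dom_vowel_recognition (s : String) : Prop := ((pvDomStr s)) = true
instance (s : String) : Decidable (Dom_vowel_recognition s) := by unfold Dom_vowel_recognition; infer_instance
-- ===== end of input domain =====

-- B replaces A's nested prefix-of-suffix rescans by one pass over the string with the
-- closed-form multiplicity (i+1)*(n-i) per character (objective: faster).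

-- ===== PORT A =====
-- helper = the repeated Python pattern 'for i in range(len(t)): if t[i] in vowels: count += 1'
-- (s[i] is always in range here, so pyGetD's default ' ' is never read)
def pvACountVowels (t : String) (count : Int) : Int :=
  (PySem.List.pyRange 0 (PySem.Str.len t) 1).foldl
    (fun count i =>
      if PySem.Str.isIn (String.singleton (PySem.List.pyGetD t.toList i ' ')) "aeiouAEIOU"
      then count + 1 else count) count

-- helper = one body of A's outer j-loop: for i in range(len(s)-1): check = s[0:i+2]; <count vowels of check>
def pvAPass (s : String) (count : Int) : Int :=
  (PySem.List.pyRange 0 (PySem.Str.len s - 1) 1).foldl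
    (fun count i =>
      let check := PySem.Str.slice s (some 0) (some (i + 2))
      pvACountVowels check count) count

def vowel_recognition (s : String) : Int :=
  let times : Int := PySem.Str.len s
  let x : Int := 0
  let count : Int := pvACountVowels s 0
  let r : String × Int := (PySem.List.pyRange 0 (times - 1) 1).foldl
    (fun sc _j => (PySem.Str.slice sc.1 (some (x + 1)) none, pvAPass sc.1 sc.2)) (s, count)
  r.2

-- ===== PORT B =====
def vowel_recognition_alt (s : String) : Int :=
  let n : Int := PySem.Str.len s
  let vowels : PySem.Set Char := PySem.Set.ofList "aeiouAEIOU".toList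
  (PySem.List.enumerate s.toList 0).foldl
    (fun acc p => if vowels.contains p.2 then acc + (p.1 + 1) * (n - p.1) else acc) 0

-- ===== PRECONDITION & SPEC =====
def Spec_vowel_recognition (s : String) (out : Int) : Prop := out = vowel_recognition_alt s
instance (s : String) (out : Int) : Decidable (Spec_vowel_recognition s out) := by unfold Spec_vowel_recognition; infer_instance

-- ===== CLAIM (what is proved, stated in full; the proofs are below) =====
def Claim_equal_vowel_recognition : Prop := ∀ (s : String), Dom_vowel_recognition s → Spec_vowel_recognition s (vowel_recognition s)

-- ===== LEMMAS AND PROOFS =====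

-- 0/1 vowel indicator and vowel count of a character list
def pvV (c : Char) : Int := if ("aeiouAEIOU".toList).contains c then 1 else 0
def pvVC (l : List Char) : Int := (l.map pvV).sum

-- contribution of one body of A's outer loop on the current suffix l
def pvT (l : List Char) : Int :=
  ((List.range (l.length - 1)).map (fun k => pvVC (l.take (k + 2)))).sum

-- sum of vowel counts of all nonempty prefixes, recursively
def pvU : List Char → Int
  | [] => 0
  | c :: t => pvV c * (t.length + 1) + pvU t

-- weighted vowel sum with positions shifted by sh: Σ v(l[q])·(q+1+sh)·(len l − q)
def pvH : Int → List Char → Int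
  | _, [] => 0
  | sh, c :: t => pvV c * (1 + sh) * ((t.length : Int) + 1) + pvH (sh + 1) t

lemma pv_isInA (c : Char) :
    PySem.Str.isIn (String.singleton c) "aeiouAEIOU" = ("aeiouAEIOU".toList).contains c := by
  rw [Bool.eq_iff_iff, PySem.Str.isIn_iff_infix]
  simp [List.singleton_infix_iff]

lemma pv_setContains (c : Char) (l : List Char) :
    (PySem.Set.ofList l).contains c = l.contains c := by
  rw [Bool.eq_iff_iff, PySem.Set.contains_iff, PySem.Set.mem_ofList]
  simp

lemma pvVC_cons (c : Char) (l : List Char) : pvVC (c :: l) = pvV c + pvVC l := by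
  simp [pvVC]

lemma pvA_count (t : String) (a : Int) : pvACountVowels t a = a + pvVC t.toList := by
  unfold pvACountVowels
  rw [PySem.Str.len_eq,
    PySem.List.foldl_pyRange_zero_pyGetD' t.toList ' '
      (fun count c => if PySem.Str.isIn (String.singleton c) "aeiouAEIOU" then count + 1 else count) a]
  simp only [pv_isInA]
  rw [PySem.List.foldl_count_if]
  unfold pvVC pvV
  rw [PySem.List.sum_map_ite_one_zero]

lemma pv_slice_take (u : String) (k : Nat) :
    (PySem.Str.slice u (some 0) (some ((k : Int) + 2))).toList = u.toList.take (k + 2) := by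
  have : ((k : Int) + 2) = ((k + 2 : Nat) : Int) := by push_cast; ring
  rw [PySem.Str.toList_slice, this]
  show PySem.List.slice u.toList (some 0) (some ((k + 2 : Nat) : Int)) = _
  rw [PySem.List.slice_zero_start, PySem.List.slice_to_natCast]

lemma pvA_pass (u : String) (a : Int) : pvAPass u a = a + pvT u.toList := by
  unfold pvAPass
  simp only [pvA_count]
  rw [PySem.List.foldl_add, PySem.Str.len_eq, PySem.List.pyRange_one]
  rw [List.map_map]
  unfold pvT
  have hn : (((u.toList.length : Int)) - 1 - 0).toNat = u.toList.length - 1 := by omega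
  rw [hn]
  have hm : ∀ k : Nat, ((fun i => pvVC (PySem.Str.slice u (some 0) (some (i + 2))).toList) ∘ fun k : Nat => (0 : Int) + ↑k) k
      = pvVC (u.toList.take (k + 2)) := by
    intro k
    simp only [Function.comp_apply, zero_add]
    rw [pv_slice_take]
  rw [List.map_congr_left (fun k _ => hm k)]

lemma pv_tail_toList (u : String) :
    (PySem.Str.slice u (some 1) none).toList = u.toList.tail := by
  rw [PySem.Str.toList_slice]
  show PySem.List.slice u.toList (some 1) none = _
  exact PySem.List.slice_from_one u.toList

lemma pvA_outer (l : List Int) (u : String) (a : Int) :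
    ((l.foldl (fun sc (_j : Int) => (PySem.Str.slice sc.1 (some (0 + 1)) none, pvAPass sc.1 sc.2)) (u, a)).2)
      = a + ((List.range l.length).map (fun j => pvT (u.toList.drop j))).sum := by
  induction l generalizing u a with
  | nil => simp
  | cons x l ih =>
    rw [List.foldl_cons, ih, pvA_pass]
    have h1 : ((PySem.Str.slice u (some (0 + 1)) none).toList) = u.toList.tail := by
      rw [show ((0 : Int) + 1) = 1 by ring]; exact pv_tail_toList u
    rw [h1, List.length_cons, List.range_succ_eq_map, List.map_cons, List.map_map, List.sum_cons,
      List.drop_zero]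
    have h2 : ∀ j : Nat, ((fun j => pvT (u.toList.drop j)) ∘ Nat.succ) j = pvT (u.toList.tail.drop j) := by
      intro j
      simp only [Function.comp_apply, List.drop_tail, Nat.succ_eq_add_one]
    rw [List.map_congr_left (fun j _ => h2 j)]
    ring

-- sum of vowel counts of prefixes of lengths 1..len t equals pvU t
lemma pv_prefix_sum (t : List Char) :
    ((List.range t.length).map (fun k => pvVC (t.take (k + 1)))).sum = pvU t := by
  induction t with
  | nil => simp [pvU]
  | cons c ts ih =>
    rw [List.length_cons]
    have h1 : ∀ k : Nat, pvVC ((c :: ts).take (k + 1)) = pvV c + pvVC (ts.take k) := by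
      intro k; rw [List.take_succ_cons, pvVC_cons]
    rw [List.map_congr_left (fun k _ => h1 k), PySem.List.sum_map_add_int,
      PySem.List.sum_map_const_int, List.length_range]
    have h2 : ((List.range (ts.length + 1)).map (fun k => pvVC (ts.take k))).sum
        = ((List.range ts.length).map (fun k => pvVC (ts.take (k + 1)))).sum := by
      rw [List.range_succ_eq_map, List.map_cons, List.sum_cons, List.map_map]
      have h3 : ∀ j : Nat, ((fun k => pvVC (ts.take k)) ∘ Nat.succ) j = pvVC (ts.take (j + 1)) := by
        intro j; simp only [Function.comp_apply, Nat.succ_eq_add_one]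
      rw [List.map_congr_left (fun j _ => h3 j)]
      simp [pvVC]
    rw [h2, ih]
    show ((ts.length : Int) + 1) * pvV c + pvU ts = pvU (c :: ts)
    rw [pvU]
    ring

-- pvU splits into one pass's contribution plus the length-1 prefix
lemma pvU_eq_T (t : List Char) : pvU t = pvT t + pvVC (t.take 1) := by
  cases t with
  | nil => simp [pvU, pvT, pvVC]
  | cons c ts =>
    have h1 : ∀ k : Nat, pvVC ((c :: ts).take (k + 2)) = pvV c + pvVC (ts.take (k + 1)) := by
      intro k; rw [List.take_succ_cons, pvVC_cons]
    unfold pvT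
    rw [List.length_cons, Nat.add_sub_cancel, List.map_congr_left (fun k _ => h1 k),
      PySem.List.sum_map_add_int, PySem.List.sum_map_const_int, List.length_range,
      pv_prefix_sum]
    rw [pvU, List.take_succ_cons, List.take_zero, pvVC_cons]
    show pvV c * ((ts.length : Int) + 1) + pvU ts
      = (ts.length : Int) * pvV c + pvU ts + (pvV c + pvVC [])
    simp [pvVC]; ring

-- summing the 1-element prefixes of all suffixes recounts every character once
lemma pv_take1_sum (t : List Char) :
    ((List.range t.length).map (fun j => pvVC ((t.drop j).take 1))).sum = pvVC t := by
  induction t with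
  | nil => simp [pvVC]
  | cons c ts ih =>
    rw [List.length_cons, List.range_succ_eq_map, List.map_cons, List.sum_cons, List.map_map]
    have h2 : ∀ j : Nat, ((fun j => pvVC (((c :: ts).drop j).take 1)) ∘ Nat.succ) j
        = pvVC ((ts.drop j).take 1) := by
      intro j; simp [Function.comp, Nat.succ_eq_add_one]
    rw [List.map_congr_left (fun j _ => h2 j), ih]
    simp [pvVC]

-- pvH collects pvU over all suffixes, with sh extra copies of pvU t
lemma pvH_eq (t : List Char) (sh : Int) :
    ((List.range t.length).map (fun j => pvU (t.drop j))).sum + sh * pvU t = pvH sh t := by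
  induction t generalizing sh with
  | nil => simp [pvU, pvH]
  | cons c ts ih =>
    rw [List.length_cons, List.range_succ_eq_map, List.map_cons, List.sum_cons, List.map_map,
      List.drop_zero]
    have h2 : ∀ j : Nat, ((fun j => pvU ((c :: ts).drop j)) ∘ Nat.succ) j = pvU (ts.drop j) := by
      intro j; simp [Function.comp, Nat.succ_eq_add_one]
    rw [List.map_congr_left (fun j _ => h2 j)]
    rw [show pvH sh (c :: ts) = pvV c * (1 + sh) * ((ts.length : Int) + 1) + pvH (sh + 1) ts from rfl,
      ← ih (sh + 1)]
    rw [show pvU (c :: ts) = pvV c * ((ts.length : Int) + 1) + pvU ts from rfl]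
    ring

-- the last suffix has length 1 and contributes nothing to the pass sum
lemma pvT_ext (t : List Char) :
    ((List.range (t.length - 1)).map (fun j => pvT (t.drop j))).sum
      = ((List.range t.length).map (fun j => pvT (t.drop j))).sum := by
  cases t with
  | nil => simp
  | cons c ts =>
    rw [List.length_cons, Nat.add_sub_cancel, List.range_succ, List.map_append, List.sum_append]
    have h1 : pvT ((c :: ts).drop ts.length) = 0 := by
      have hlen : ((c :: ts).drop ts.length).length = 1 := by
        rw [List.length_drop, List.length_cons]; omega
      unfold pvT
      rw [hlen]
      simp
    simp [h1]

-- main identity: A's total equals the weighted single-pass sum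
lemma pv_main (t : List Char) :
    pvVC t + ((List.range t.length).map (fun j => pvT (t.drop j))).sum = pvH 0 t := by
  have h1 : ∀ j : Nat, pvU (t.drop j) = pvT (t.drop j) + pvVC ((t.drop j).take 1) :=
    fun j => pvU_eq_T (t.drop j)
  have h2 := pvH_eq t 0
  rw [List.map_congr_left (fun j _ => h1 j), PySem.List.sum_map_add_int, pv_take1_sum] at h2
  rw [zero_mul, add_zero] at h2
  rw [← h2]
  ring

lemma pvB_fold (t : List Char) (sh a N : Int) (h : sh + (t.length : Int) = N) :
    ((PySem.List.enumerate t sh).foldl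
      (fun acc p => if (PySem.Set.ofList "aeiouAEIOU".toList).contains p.2
                    then acc + (p.1 + 1) * (N - p.1) else acc) a) = a + pvH sh t := by
  induction t generalizing sh a with
  | nil => simp [PySem.List.enumerate, pvH]
  | cons c ts ih =>
    simp only [List.length_cons, Nat.cast_add, Nat.cast_one] at h
    rw [PySem.List.enumerate_cons, List.foldl_cons, ih (sh + 1) _ (by omega)]
    have hN : N - sh = (ts.length : Int) + 1 := by omega
    rw [show pvH sh (c :: ts) = pvV c * (1 + sh) * ((ts.length : Int) + 1) + pvH (sh + 1) ts from rfl]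
    by_cases hc : ("aeiouAEIOU".toList).contains c
    · rw [pv_setContains, if_pos hc, pvV, if_pos hc, hN]
      ring
    · rw [pv_setContains, if_neg hc, pvV, if_neg hc]
      ring

lemma pvA_val (s : String) : vowel_recognition s = pvH 0 s.toList := by
  show ((PySem.List.pyRange 0 (PySem.Str.len s - 1) 1).foldl
    (fun sc (_j : Int) => (PySem.Str.slice sc.1 (some (0 + 1)) none, pvAPass sc.1 sc.2))
    (s, pvACountVowels s 0)).2 = pvH 0 s.toList
  rw [pvA_outer, pvA_count, PySem.List.length_pyRange_one, PySem.Str.len_eq]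
  have hn : (((s.toList.length : Int)) - 1 - 0).toNat = s.toList.length - 1 := by omega
  rw [hn, pvT_ext, zero_add]
  exact pv_main s.toList

lemma pvB_val (s : String) : vowel_recognition_alt s = pvH 0 s.toList := by
  show ((PySem.List.enumerate s.toList 0).foldl
    (fun acc p => if (PySem.Set.ofList "aeiouAEIOU".toList).contains p.2
                  then acc + (p.1 + 1) * (PySem.Str.len s - p.1) else acc) 0) = pvH 0 s.toList
  rw [pvB_fold s.toList 0 0 (PySem.Str.len s) (by rw [PySem.Str.len_eq]; ring), zero_add]

-- ===== VERDICT (by name: the statement is the Claim_ definition above) =====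
theorem vowel_recognition_spec : Claim_equal_vowel_recognition := by
  intro s _
  unfold Spec_vowel_recognition
  rw [pvA_val, pvB_val]
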